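-- pv_equiv track=rewrite | github.com/mzazon/awesome-cloud-projects | aws/responding-to-incidents-with-security-hub/code/terraform/lambda_code/threat_intelligence.py | has_long_consonant_sequences
-- ===== SOURCE A (Python) =====
-- def has_long_consonant_sequences(text: str) -> bool:
--     """
--     Check for long consonant sequences.
--
--     Args:
--         text: Text to analyze
--
--     Returns:
--         True if text has long consonant sequences
--     """
--     vowels = set('aeiou')
--     consonant_streak = 0
--     max_streak = 0
--
--     for char in text:
--         if char.isalpha():
--             if char not in vowels:
--                 consonant_streak += 1
--                 max_streak = max(max_streak, consonant_streak)
--             else: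
--                 consonant_streak = 0
--
--     return max_streak >= 4
-- ===== SOURCE B (Python) =====
-- from itertools import groupby
--
--
-- def has_long_consonant_sequences(text: str) -> bool:
--     # Keep only alphabetic chars, classify each as consonant (True) or
--     # lowercase vowel (False); non-alpha chars are dropped, so a consonant
--     # run continues across them, and uppercase vowels count as consonants
--     # (they are not in 'aeiou'), exactly as in the original.
--     flags = [c not in 'aeiou' for c in text if c.isalpha()]
--     longest = max((sum(1 for _ in g) for is_cons, g in groupby(flags) if is_cons), default=0)
--     return longest >= 4
-- ===== Notes on version B (the rewrite author's own statement) =====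
-- stated objective: alternative
-- what changed: Replaces the streak-counter fold over raw characters by filtering to alphabetic characters, classifying them into consonant/vowel booleans, and taking the maximum length of consonant groups via itertools.groupby.
import Mathlib
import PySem

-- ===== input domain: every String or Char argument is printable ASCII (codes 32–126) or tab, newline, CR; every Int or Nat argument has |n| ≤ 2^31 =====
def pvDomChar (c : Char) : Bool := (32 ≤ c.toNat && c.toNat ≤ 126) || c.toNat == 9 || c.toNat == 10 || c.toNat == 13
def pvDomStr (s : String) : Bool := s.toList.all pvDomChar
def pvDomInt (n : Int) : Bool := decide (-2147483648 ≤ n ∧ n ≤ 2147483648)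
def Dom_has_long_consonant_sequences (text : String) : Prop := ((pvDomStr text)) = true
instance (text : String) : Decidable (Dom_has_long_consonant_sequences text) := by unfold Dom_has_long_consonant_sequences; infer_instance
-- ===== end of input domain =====

-- B replaces A's per-character streak-counter loop by a filter+classify+groupby maximum-consonant-run decomposition; objective: alternative.


-- ===== PORT A =====
-- loop body of A's for-loop (state = (consonant_streak, max_streak))
def pvLoopA (st : Nat × Nat) (c : Char) : Nat × Nat :=
  if PySem.Chars.isalpha c then
    if !(['a','e','i','o','u'].contains c) then (st.1 + 1, max st.2 (st.1 + 1))
    else (0, st.2)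
  else st

def has_long_consonant_sequences (text : String) : Bool :=
  decide ((text.toList.foldl pvLoopA (0, 0)).2 ≥ 4)

-- ===== PORT B =====
-- groupby over the boolean flags: lengths of the maximal groups whose key is true
def pvGroupTrueLens : List Bool → List Nat
  | [] => []
  | b :: rest =>
    let grp := rest.takeWhile (· == b)
    let rest' := rest.dropWhile (· == b)
    if b then (grp.length + 1) :: pvGroupTrueLens rest'
    else pvGroupTrueLens rest'
termination_by l => l.length
decreasing_by
  all_goals
    simpa using Nat.lt_succ_of_le (List.length_dropWhile_le (· == b) rest)

def has_long_consonant_sequences_alt (text : String) : Bool :=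
  let flags := (text.toList.filter PySem.Chars.isalpha).map
    (fun c => !(['a','e','i','o','u'].contains c))
  let longest := (pvGroupTrueLens flags).foldl max 0
  decide (longest ≥ 4)

-- ===== PRECONDITION & SPEC =====
def Spec_has_long_consonant_sequences (text : String) (out : Bool) : Prop := out = has_long_consonant_sequences_alt text
instance (text : String) (out : Bool) : Decidable (Spec_has_long_consonant_sequences text out) := by unfold Spec_has_long_consonant_sequences; infer_instance

-- ===== CLAIM (what is proved, stated in full; the proofs are below) =====
def Claim_equal_has_long_consonant_sequences : Prop := ∀ (text : String), Dom_has_long_consonant_sequences text → Spec_has_long_consonant_sequences text (has_long_consonant_sequences text)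

-- ===== LEMMAS AND PROOFS =====

-- A's loop body, restricted to the boolean classification of an alphabetic char
def pvStep (st : Nat × Nat) (b : Bool) : Nat × Nat :=
  if b then (st.1 + 1, max st.2 (st.1 + 1)) else (0, st.2)

-- "best ending run" semantics of A's fold: max over suffix positions of the streak there
def pvG : Nat → List Bool → Nat
  | _, [] => 0
  | s, true :: rest => max (s + 1) (pvG (s + 1) rest)
  | _, false :: rest => pvG 0 rest

theorem pv_foldA_eq_foldStep (cs : List Char) :
    ∀ st : Nat × Nat,
      cs.foldl pvLoopA st =
      ((cs.filter PySem.Chars.isalpha).map (fun c => !(['a','e','i','o','u'].contains c))).foldl pvStep st := by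
  induction cs with
  | nil => intro st; rfl
  | cons c cs ih =>
    intro st
    by_cases h : PySem.Chars.isalpha c = true
    · simp [h, pvLoopA, pvStep, ih]
    · simp [h, pvLoopA, ih]

theorem pv_foldStep_eq_pvG (bs : List Bool) :
    ∀ s m : Nat, (bs.foldl pvStep (s, m)).2 = max m (pvG s bs) := by
  induction bs with
  | nil => intro s m; simp [pvG]
  | cons b bs ih =>
    intro s m
    cases b with
    | true =>
      rw [List.foldl_cons, show pvStep (s, m) true = (s + 1, max m (s + 1)) from rfl, ih]
      simp only [pvG]
      omega
    | false =>
      rw [List.foldl_cons, show pvStep (s, m) false = (0, m) from rfl, ih]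
      simp only [pvG]

theorem pv_pvG_true_run (run : List Bool) (h : ∀ x ∈ run, x = true) :
    ∀ tail s, pvG s (true :: (run ++ tail)) = max (s + 1 + run.length) (pvG (s + 1 + run.length) tail) := by
  induction run with
  | nil => intro tail s; simp [pvG]
  | cons x run ih =>
    intro tail s
    have hx : x = true := h x (List.mem_cons_self ..)
    subst hx
    have h' : ∀ y ∈ run, y = true := fun y hy => h y (List.mem_cons_of_mem _ hy)
    show max (s + 1) (pvG (s + 1) ((true :: run) ++ tail)) = _
    rw [List.cons_append, ih h' tail (s + 1)]
    simp only [List.length_cons]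
    have harith : s + 1 + 1 + run.length = s + 1 + (run.length + 1) := by omega
    rw [harith]
    omega

theorem pv_pvG_false_run (run : List Bool) (h : ∀ x ∈ run, x = false) :
    ∀ tail s, pvG s (false :: (run ++ tail)) = pvG 0 tail := by
  induction run with
  | nil => intro tail s; simp [pvG]
  | cons x run ih =>
    intro tail s
    have hx : x = false := h x (List.mem_cons_self ..)
    subst hx
    have h' : ∀ y ∈ run, y = false := fun y hy => h y (List.mem_cons_of_mem _ hy)
    show pvG 0 ((false :: run) ++ tail) = pvG 0 tail
    rw [List.cons_append]
    exact ih h' tail 0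

theorem pv_foldl_max_shift (l : List Nat) : ∀ a : Nat, l.foldl max a = max a (l.foldl max 0) := by
  induction l with
  | nil => intro a; simp
  | cons b l ih =>
    intro a
    simp only [List.foldl_cons]
    rw [ih (max a b), ih (max 0 b)]
    omega

theorem pv_dropWhile_head_false {α : Type} (p : α → Bool) :
    ∀ (l : List α) (x : α) (t : List α), l.dropWhile p = x :: t → p x = false := by
  intro l
  induction l with
  | nil => intro x t h; simp [List.dropWhile] at h
  | cons y l ih =>
    intro x t h
    by_cases hy : p y = true
    · rw [List.dropWhile_cons_of_pos hy] at h; exact ih x t h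
    · rw [List.dropWhile_cons_of_neg hy] at h
      cases h; simpa using hy

theorem pv_pvG_eq_groups : ∀ (n : Nat) (bs : List Bool), bs.length ≤ n →
    pvG 0 bs = (pvGroupTrueLens bs).foldl max 0 := by
  intro n
  induction n with
  | zero =>
    intro bs h
    have hnil : bs = [] := List.eq_nil_of_length_eq_zero (Nat.le_zero.mp h)
    subst hnil
    simp [pvGroupTrueLens, pvG]
  | succ n ih =>
    intro bs hlen
    match bs with
    | [] => simp [pvGroupTrueLens, pvG]
    | b :: rest =>
      have hsplit : rest.takeWhile (· == b) ++ rest.dropWhile (· == b) = rest :=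
        List.takeWhile_append_dropWhile
      have hdroplen : (rest.dropWhile (· == b)).length ≤ n := by
        have := List.length_dropWhile_le (· == b) rest
        simp at hlen; omega
      have hIH := ih (rest.dropWhile (· == b)) hdroplen
      cases b with
      | true =>
        have hrun : ∀ x ∈ rest.takeWhile (· == true), x = true := fun x hx => by
          simpa using List.mem_takeWhile_imp hx
        have hG : pvG 0 (true :: rest) =
            max (0 + 1 + (rest.takeWhile (· == true)).length)
              (pvG (0 + 1 + (rest.takeWhile (· == true)).length) (rest.dropWhile (· == true))) := by
          conv_lhs => rw [← hsplit]
          exact pv_pvG_true_run _ hrun _ 0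
        have htail : pvG (0 + 1 + (rest.takeWhile (· == true)).length) (rest.dropWhile (· == true)) =
            pvG 0 (rest.dropWhile (· == true)) := by
          cases hd : rest.dropWhile (· == true) with
          | nil => rfl
          | cons x t =>
            have hx := pv_dropWhile_head_false (· == true) rest x t hd
            have hx' : x = false := by simpa using hx
            subst hx'; rfl
        have hB : pvGroupTrueLens (true :: rest) =
            ((rest.takeWhile (· == true)).length + 1) :: pvGroupTrueLens (rest.dropWhile (· == true)) := by
          rw [pvGroupTrueLens]; simp
        rw [hG, htail, hIH, hB, List.foldl_cons,
          pv_foldl_max_shift _ (max 0 ((rest.takeWhile (· == true)).length + 1))]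
        omega
      | false =>
        have hrun : ∀ x ∈ rest.takeWhile (· == false), x = false := fun x hx => by
          simpa using List.mem_takeWhile_imp hx
        have hG : pvG 0 (false :: rest) = pvG 0 (rest.dropWhile (· == false)) := by
          conv_lhs => rw [← hsplit]
          exact pv_pvG_false_run _ hrun _ 0
        have hB : pvGroupTrueLens (false :: rest) = pvGroupTrueLens (rest.dropWhile (· == false)) := by
          rw [pvGroupTrueLens]; simp
        rw [hG, hIH, hB]

-- ===== VERDICT (by name: the statement is the Claim_ definition above) =====
theorem has_long_consonant_sequences_spec : Claim_equal_has_long_consonant_sequences := by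
  intro text _
  unfold Spec_has_long_consonant_sequences has_long_consonant_sequences has_long_consonant_sequences_alt
  rw [pv_foldA_eq_foldStep, pv_foldStep_eq_pvG,
    pv_pvG_eq_groups _ _ (Nat.le_refl _)]
  simp
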